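-- pv_equiv track=rewrite | github.com/Bekalah/cathedral-research | cathedral-technical/book-processor/creative-engines/fashion_art_engine.py | _extract_visual_concepts
-- ===== SOURCE A (Python) =====
-- def _extract_visual_concepts(text):
--     """Extract visual art concepts from text"""
--     concepts = {}
--     text_lower = text.lower()
--
--     # Visual descriptors
--     visual_words = ["light", "shadow", "bright", "dark", "radiant", "mysterious", "luminous", "ethereal"]
--     found_visual = [word for word in visual_words if word in text_lower]
--     if found_visual:
--         concepts["lighting"] = found_visual
--
--     # Geometric elements
--     geo_words = ["circle", "triangle", "square", "spiral", "mandala", "geometric", "pattern"]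
--     found_geo = [word for word in geo_words if word in text_lower]
--     if found_geo:
--         concepts["geometry"] = found_geo
--
--     # Mystical imagery
--     mystical_words = ["angel", "deity", "divine", "sacred", "holy", "blessed", "transcendent"]
--     found_mystical = [word for word in mystical_words if word in text_lower]
--     if found_mystical:
--         concepts["mystical"] = found_mystical
--
--     return concepts
-- ===== SOURCE B (Python) =====
-- CONCEPT_TABLE = [
--     ("lighting", ["light", "shadow", "bright", "dark", "radiant", "mysterious", "luminous", "ethereal"]),
--     ("geometry", ["circle", "triangle", "square", "spiral", "mandala", "geometric", "pattern"]),
--     ("mystical", ["angel", "deity", "divine", "sacred", "holy", "blessed", "transcendent"]),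
-- ]
--
-- def _extract_visual_concepts(text):
--     """Extract visual art concepts by a single position-driven scan of the text:
--     walk every offset of the lowered text once and mark each keyword that starts
--     there, instead of running a separate substring search per keyword."""
--     text_lower = text.lower()
--     found = set()
--     for i in range(len(text_lower)):
--         for _name, words in CONCEPT_TABLE:
--             for w in words:
--                 if text_lower.startswith(w, i):
--                     found.add(w)
--     concepts = {}
--     for name, words in CONCEPT_TABLE:
--         hits = [w for w in words if w in found]
--         if hits:
--             concepts[name] = hits
--     return concepts
-- ===== Notes on version B (the rewrite author's own statement) =====
-- stated objective: alternative
-- what changed: Instead of running a separate Python substring-membership search for each of the 22 keywords, B lowercases the text and scans its positions once, marking in a set every keyword that starts at each offset, then assembles the categories from that found-set; output order and contents are identical.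
import Mathlib
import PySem

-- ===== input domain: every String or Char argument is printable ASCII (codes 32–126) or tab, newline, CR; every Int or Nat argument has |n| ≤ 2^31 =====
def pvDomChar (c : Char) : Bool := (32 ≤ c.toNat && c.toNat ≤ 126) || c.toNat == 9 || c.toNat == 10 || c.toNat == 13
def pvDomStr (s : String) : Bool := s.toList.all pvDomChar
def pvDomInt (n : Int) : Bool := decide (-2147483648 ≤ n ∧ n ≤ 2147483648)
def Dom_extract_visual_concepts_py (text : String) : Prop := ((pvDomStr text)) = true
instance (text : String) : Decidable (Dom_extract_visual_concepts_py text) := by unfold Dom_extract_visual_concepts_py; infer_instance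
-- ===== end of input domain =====

-- B replaces A's per-keyword 'word in text' substring searches by a single position-driven scan
-- of the lowered text that marks every keyword starting at each offset (objective: alternative).

-- ===== PORT A =====
def extract_visual_concepts_py (text : String) : List (String × List String) :=
  let concepts : PySem.Dict String (List String) := PySem.Dict.empty
  let text_lower := PySem.Str.lower text
  let visual_words := ["light", "shadow", "bright", "dark", "radiant", "mysterious", "luminous", "ethereal"]
  let found_visual := visual_words.filter (fun w => PySem.Str.isIn w text_lower)
  let concepts := if found_visual.isEmpty then concepts else concepts.insert "lighting" found_visual
  let geo_words := ["circle", "triangle", "square", "spiral", "mandala", "geometric", "pattern"]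
  let found_geo := geo_words.filter (fun w => PySem.Str.isIn w text_lower)
  let concepts := if found_geo.isEmpty then concepts else concepts.insert "geometry" found_geo
  let mystical_words := ["angel", "deity", "divine", "sacred", "holy", "blessed", "transcendent"]
  let found_mystical := mystical_words.filter (fun w => PySem.Str.isIn w text_lower)
  let concepts := if found_mystical.isEmpty then concepts else concepts.insert "mystical" found_mystical
  concepts.items

-- ===== PORT B =====
def pvConceptTable : List (String × List String) :=
  [("lighting", ["light", "shadow", "bright", "dark", "radiant", "mysterious", "luminous", "ethereal"]),
   ("geometry", ["circle", "triangle", "square", "spiral", "mandala", "geometric", "pattern"]),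
   ("mystical", ["angel", "deity", "divine", "sacred", "holy", "blessed", "transcendent"])]

-- the found-set of B: walk every offset of the lowered text, mark each keyword starting there
def pvFound (tlc : List Char) : PySem.Set String :=
  (PySem.List.pyRange 0 (tlc.length : Int) 1).foldl
    (fun found i =>
      -- text_lower.startswith(w, i): ported by hand as startswith on the dropped suffix;
      -- exact for the non-negative in-range i produced by pyRange 0 len 1
      pvConceptTable.foldl
        (fun found p =>
          p.2.foldl
            (fun found w =>
              if PySem.Chars.startswith (tlc.drop i.toNat) w.toList then PySem.Set.add found w else found)
            found)
        found)
    PySem.Set.empty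

def extract_visual_concepts_py_alt (text : String) : List (String × List String) :=
  let text_lower := PySem.Str.lower text
  let found := pvFound text_lower.toList
  let concepts := pvConceptTable.foldl
    (fun concepts p =>
      let hits := p.2.filter (fun w => PySem.Set.contains found w)
      if hits.isEmpty then concepts else concepts.insert p.1 hits)
    PySem.Dict.empty
  concepts.items

-- ===== PRECONDITION & SPEC =====
def Spec_extract_visual_concepts_py (text : String) (out : List (String × List String)) : Prop := out = extract_visual_concepts_py_alt text
instance (text : String) (out : List (String × List String)) : Decidable (Spec_extract_visual_concepts_py text out) := by unfold Spec_extract_visual_concepts_py; infer_instance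

-- ===== CLAIM (what is proved, stated in full; the proofs are below) =====
def Claim_equal_extract_visual_concepts_py : Prop := ∀ (text : String), Dom_extract_visual_concepts_py text → Spec_extract_visual_concepts_py text (extract_visual_concepts_py text)

-- ===== LEMMAS AND PROOFS =====

-- membership in a fold that conditionally adds the words of one list
lemma pv_mem_addIf (ws : List String) (cond : String → Bool) (acc : PySem.Set String) (w : String) :
    w ∈ ws.foldl (fun a v => if cond v then PySem.Set.add a v else a) acc ↔
      w ∈ acc ∨ (w ∈ ws ∧ cond w = true) := by
  induction ws generalizing acc with
  | nil => simp
  | cons v vs ih =>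
    simp only [List.foldl_cons, ih]
    by_cases h : cond v
    · simp [h, PySem.Set.mem_add]
      constructor
      · rintro ((ha | rfl) | hv) <;> tauto
      · rintro (ha | ⟨(rfl | hv), hc⟩) <;> tauto
    · simp [h]
      constructor
      · rintro (ha | hv) <;> tauto
      · rintro (ha | ⟨(rfl | hv), hc⟩) <;> simp_all

-- membership after one position step (the nested fold over the whole table)
lemma pv_mem_tableStep (tbl : List (String × List String)) (cond : String → Bool)
    (acc : PySem.Set String) (w : String) :
    w ∈ tbl.foldl (fun a p => p.2.foldl (fun a v => if cond v then PySem.Set.add a v else a) a) acc ↔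
      w ∈ acc ∨ ((∃ p ∈ tbl, w ∈ p.2) ∧ cond w = true) := by
  induction tbl generalizing acc with
  | nil => simp
  | cons p ps ih =>
    simp only [List.foldl_cons, ih, pv_mem_addIf]
    constructor
    · rintro ((ha | ⟨hw, hc⟩) | ⟨⟨q, hq, hw⟩, hc⟩)
      · tauto
      · exact Or.inr ⟨⟨p, by simp, hw⟩, hc⟩
      · exact Or.inr ⟨⟨q, by simp [hq], hw⟩, hc⟩
    · rintro (ha | ⟨⟨q, hq, hw⟩, hc⟩)
      · tauto
      · rcases List.mem_cons.mp hq with rfl | hq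
        · exact Or.inl (Or.inr ⟨hw, hc⟩)
        · exact Or.inr ⟨⟨q, hq, hw⟩, hc⟩

-- membership in the whole scan fold over a list of positions
lemma pv_mem_scan (is : List Int) (tlc : List Char) (acc : PySem.Set String) (w : String) :
    w ∈ is.foldl
        (fun found i =>
          pvConceptTable.foldl
            (fun found p =>
              p.2.foldl
                (fun found v =>
                  if PySem.Chars.startswith (tlc.drop i.toNat) v.toList then PySem.Set.add found v else found)
                found)
            found)
        acc ↔
      w ∈ acc ∨ ((∃ p ∈ pvConceptTable, w ∈ p.2) ∧
        ∃ i ∈ is, PySem.Chars.startswith (tlc.drop i.toNat) w.toList = true) := by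
  induction is generalizing acc with
  | nil => simp
  | cons i is ih =>
    simp only [List.foldl_cons, ih, pv_mem_tableStep]
    constructor
    · rintro ((ha | ⟨hm, hc⟩) | ⟨hm, j, hj, hc⟩)
      · tauto
      · exact Or.inr ⟨hm, i, by simp, hc⟩
      · exact Or.inr ⟨hm, j, by simp [hj], hc⟩
    · rintro (ha | ⟨hm, j, hj, hc⟩)
      · tauto
      · rcases List.mem_cons.mp hj with rfl | hj
        · exact Or.inl (Or.inr ⟨hm, hc⟩)
        · exact Or.inr ⟨hm, j, hj, hc⟩

-- the found-set holds exactly the table keywords that occur in the lowered text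
lemma pv_contains_found (tlc : List Char) (w : String) (hne : w.toList ≠ [])
    (hmem : ∃ p ∈ pvConceptTable, w ∈ p.2) :
    PySem.Set.contains (pvFound tlc) w = PySem.Chars.isIn w.toList tlc := by
  rw [Bool.eq_iff_iff, PySem.Set.contains_iff, pvFound, pv_mem_scan,
    ← PySem.Chars.exists_prefix_drop_iff_isIn]
  constructor
  · rintro (h | ⟨_, i, hi, hc⟩)
    · simp [PySem.Set.empty] at h
    · rcases PySem.List.mem_pyRange_one.mp hi with ⟨h0, hlt⟩
      exact ⟨i.toNat, (PySem.Chars.startswith_iff _ _).mp hc⟩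
  · rintro ⟨j, hj⟩
    have hjlt : j < tlc.length := by
      by_contra hge
      rw [List.drop_eq_nil_of_le (by omega)] at hj
      exact hne (List.prefix_nil.mp hj)
    refine Or.inr ⟨hmem, (j : Int), PySem.List.mem_pyRange_one.mpr (by omega), ?_⟩
    exact (PySem.Chars.startswith_iff _ _).mpr (by simpa using hj)

-- each category's filter in B equals A's filter
lemma pv_filter_eq (text : String) (p : String × List String) (hp : p ∈ pvConceptTable) :
    p.2.filter (fun w => PySem.Set.contains (pvFound (PySem.Str.lower text).toList) w) =
      p.2.filter (fun w => PySem.Str.isIn w (PySem.Str.lower text)) := by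
  apply List.filter_congr
  intro w hw
  rw [PySem.Str.isIn_eq,
    pv_contains_found (PySem.Str.lower text).toList w
      (by fin_cases hp <;> fin_cases hw <;> decide)
      ⟨p, hp, hw⟩]

-- ===== VERDICT (by name: the statement is the Claim_ definition above) =====
theorem extract_visual_concepts_py_spec : Claim_equal_extract_visual_concepts_py := by
  intro text _
  unfold Spec_extract_visual_concepts_py extract_visual_concepts_py extract_visual_concepts_py_alt
  have h1 := pv_filter_eq text ("lighting", ["light", "shadow", "bright", "dark", "radiant", "mysterious", "luminous", "ethereal"]) (by simp [pvConceptTable])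
  have h2 := pv_filter_eq text ("geometry", ["circle", "triangle", "square", "spiral", "mandala", "geometric", "pattern"]) (by simp [pvConceptTable])
  have h3 := pv_filter_eq text ("mystical", ["angel", "deity", "divine", "sacred", "holy", "blessed", "transcendent"]) (by simp [pvConceptTable])
  simp only [pvConceptTable, List.foldl_cons, List.foldl_nil] at *
  rw [h1, h2, h3]
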